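/- GENERATED by tools/from_farm_form.py from prooffarm-gif/accepted/prog_main.P/Proof.lean (a worked proof of the farm's unit `prog_main.P`,
   accepted by the verdict) — do not edit. -/
import Gif.Spec.Units.prog_main_P
import Gif.Spec.AllSegs

open X86 X86.User Asan ProgX.Base ProgX.Base.Spec Gif.Spec

set_option maxRecDepth 4000
set_option maxHeartbeats 4000000

/-!
  `prog_main.P` (0x105000 … 0x105042, 12 instructions; gif_driver.c:246): THE PROLOGUE OF THE DRIVER'S TOP FUNCTION, a protected
  frame at HEAP LEVEL (no forest, no reader, no `Env`: the exit assertion `Body` carries `HeapInv` and `Consts` only). The recipe is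
  that of farm.gif/worked/DGifGetWord.P (Gif/Spec/FrameCarry.lean §1 – §3) with `after_prologue` replaced by its heap-level half:
    1. the prelude and the walk to the cut behind the last inline shadow store;
    2. `name_stores2`: the memory before the two shadow stores gets the name `M0`;
    3. about `M0` (a nest of STACK stores over `e.mem`): the footprint `hsame0`, the saved registers' slots;
    4. `HeapInv.stack_windows` (the stack stores keep `HeapInv` and `Consts`), `HeapInv.prologue_ra` (the own frame is pushed),
       `Consts.sameExcept` over the shadow stores, `prologue_same` (the footprint);
    5. the exit assertion `Body`, field by field.
-/

/-- The prologue of `prog_main` establishes `Body` at 0x105042. -/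
theorem Gif.Spec.Proved.prog_main_P_ok : Gif.Spec.prog_main_P.Statement := by
  intro Lay hLay μ hμ u₀ hcode H rest frames e ret he hpre
  -- 1. THE PRELUDE: the entry's facts, the precondition
  have he0 := he
  v_entry he
  obtain ⟨hheap, hglob, hconsts0, hin, hout⟩ := hpre
  -- THE WALK, 0x105000 … 0x105042 (gif_driver.c:246), to the cut behind the last inline shadow store
  u_walk hcode [hμ.vendor] until [Gif.L.prog_main.at_105042] span [ProgX.Base.L.textLo, ProgX.Base.L.textHi] side (v_side)
  -- 2. NAMING THE MEMORY before the two shadow stores (0x10502e, 0x105038)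
  have e168 : (e.reg .rsp - 168).toNat = (e.reg .rsp).toNat - 168 := by u_omega
  obtain ⟨M0, hM0, hmem⟩ := name_stores2 (e.reg .rsp - 168) 12582912 12582924 0 4 4059165169 12 4 4092851187
    w_mem (by omega) (by decide) (by decide) (by decide) (by decide)
  have hpro : Gif.Frames.prog_main.prologue = [⟨0, 4, 4059165169⟩, ⟨12, 4, 4092851187⟩] := rfl
  rw [← hpro, e168] at hmem
  -- 3. ABOUT `M0`: only stack stores over `e.mem` (four pushes, the frame's three header words)
  have hsame0 : Mem.SameExcept [⟨(e.reg .rsp).toNat - 1168, (e.reg .rsp).toNat⟩] e.mem M0 := by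
    rw [hM0]
    u_same
  have k_r13 : M0.readLE (e.reg .rsp - 8) 8 = (e.reg .r13).toNat := by
    rw [hM0]
    u_read
  have k_r12 : M0.readLE (e.reg .rsp - 16) 8 = (e.reg .r12).toNat := by
    rw [hM0]
    u_read
  have k_rbp : M0.readLE (e.reg .rsp - 24) 8 = (e.reg .rbp).toNat := by
    rw [hM0]
    u_read
  have k_rbx : M0.readLE (e.reg .rsp - 32) 8 = (e.reg .rbx).toNat := by
    rw [hM0]
    u_read
  clear hM0 w_mem
  -- 4. THE HEAP'S INVARIANT AND THE CONSTANTS behind the prologue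
  -- the stack stores: inside the stack region
  have hwin0 : ∀ w, w ∈ ([⟨(e.reg .rsp).toNat - 1168, (e.reg .rsp).toNat⟩] : List Span) →
      0x700000 ≤ w.lo ∧ w.hi ≤ 0x800000 := by
    intro w hw
    have hw_eq := List.mem_singleton.mp hw
    rw [hw_eq]
    simp only
    omega
  obtain ⟨hinv0, hconsts_step⟩ := hheap.inv.stack_windows hheap.base hsame0 hwin0
  have hconstsM : Consts M0 := hconsts_step hconsts0
  -- the inline shadow stores: the own frame is pushed
  have hinv1 : HeapInv H rest (((e.reg .rsp).toNat - 168, Gif.Frames.prog_main) :: frames) ((e.reg .rsp).toNat - 168)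
      (storesMem M0 (((e.reg .rsp).toNat - 168) / 8) Gif.Frames.prog_main.prologue) :=
    hinv0.prologue_ra Gif.Frames.prog_main_ok he_align (Nat.le_refl _) (by omega) (by omega)
  -- … and the constants are far below the shadow
  have hpin : ∀ s, s ∈ Gif.Frames.prog_main.prologue → s.idx + s.width ≤ 16 := by decide
  have hconsts1 : Consts (storesMem M0 (((e.reg .rsp).toNat - 168) / 8) Gif.Frames.prog_main.prologue) := by
    apply hconstsM.sameExcept (storesMem_sameExcept M0 _ 16 Gif.Frames.prog_main.prologue hpin (by omega))
    intro w hw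
    have hw_eq := List.mem_singleton.mp hw
    rw [hw_eq]
    right
    simp only
    omega
  -- the prologue's own footprint (for the return address), and the same in front of the contract's windows (`Core.same`)
  have hsame1 := prologue_same (top := (e.reg .rsp).toNat) (Fl := Gif.Frames.prog_main) Gif.Frames.prog_main_ok
    (ro := 168) (ro' := 40) rfl rfl he_align (by omega) (by omega) hsame0 []
  have hsame2 := prologue_same (top := (e.reg .rsp).toNat) (Fl := Gif.Frames.prog_main) Gif.Frames.prog_main_ok
    (ro := 168) (ro' := 40) rfl rfl he_align (by omega) (by omega) hsame0
    [⟨0x800000, 0x1000020⟩, ⟨(e.reg .rdx).toNat, (e.reg .rdx).toNat + 64⟩]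
  rw [← hmem] at hinv1 hconsts1 hsame1 hsame2
  -- 5. THE EXIT ASSERTION: `Core` at 0x105042 …
  have hcore : prog_main.Core Gif.L.prog_main.at_105042 H rest frames u₀ e ret s_105038 := {
    entry := he0
    pre := ⟨hheap, hglob, hconsts0, hin, hout⟩
    rip := w_rip
    rsp := w_rsp
    rbx := w_rbx
    r14 := w_kept.get .r14 rfl
    r15 := w_kept.get .r15 rfl
    -- a slot is read THROUGH the shadow stores (`readLE_storesMem`), then in `M0`
    slot_r13 := by
      rw [hmem, readLE_storesMem M0 _ 16 _ hpin (by omega) _ _ (by u_omega)]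
      exact k_r13
    slot_r12 := by
      rw [hmem, readLE_storesMem M0 _ 16 _ hpin (by omega) _ _ (by u_omega)]
      exact k_r12
    slot_rbp := by
      rw [hmem, readLE_storesMem M0 _ 16 _ hpin (by omega) _ _ (by u_omega)]
      exact k_rbp
    slot_rbx := by
      rw [hmem, readLE_storesMem M0 _ 16 _ hpin (by omega) _ _ (by u_omega)]
      exact k_rbx
    -- the return address: the prologue's footprint ends below its slot
    slot_ra := by
      rw [prologue_same_readLE hsame1 (e.reg .rsp) 8 (Nat.le_refl _) (by omega)]
      exact he_retAddr
    same := hsame2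
    code := ProgX.Base.conv_code_in w_eq
    -- DF and MXCSR by hand (`v_inv` is slow behind a walk with shadow stores)
    abi := by
      refine ProgX.Base.abiInv_of ?_ ?_
      · rw [w_flags]
        simp only [X86.User.df_setStatus]
        exact he_df
      · rw [w_mxcsr]
        exact he_mx
  }
  -- … and `Body`: the argument registers, the heap's invariant with the own frame pushed, the constants
  refine ReachVia.done ?_
  exact {
    core := hcore
    rdi := w_kept.get .rdi rfl
    rsi := w_kept.get .rsi rfl
    rdx := w_kept.get .rdx rfl
    rcx := w_kept.get .rcx rfl
    inv := hinv1
    consts := hconsts1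
  }
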